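-- pv_equiv track=rewrite | github.com/phobo-at/pi-hub | smart_display/watch_faces.py | qlocktwo_ooe_active_cells
-- ===== SOURCE A (Python) =====
-- from typing import Iterable
--
-- def _expand(word: tuple[int, int, int]) -> Iterable[tuple[int, int]]:
--     row, col, length = word
--     for i in range(length):
--         yield (row, col + i)
--
-- def _hour_12(hour_24: int) -> int:
--     h = hour_24 % 12
--     return 12 if h == 0 else h
--
-- _OOE_ES = (0, 0, 2)
--
-- _OOE_IS = (0, 3, 2)
--
-- _OOE_FUEMF_MIN = (0, 7, 4)
--
-- _OOE_ZEHN_MIN = (1, 0, 4)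
--
-- _OOE_ZWANZG_MIN = (1, 5, 6)
--
-- _OOE_VIERTL = (2, 4, 6)
--
-- _OOE_NOCH = (3, 2, 4)
--
-- _OOE_VOR = (3, 7, 3)
--
-- _OOE_HOIBE = (4, 0, 5)
--
-- _OOE_HOUR_WORDS: dict[int, tuple[int, int, int]] = {
--     1: (7, 0, 4),      # OANS
--     2: (7, 4, 4),      # ZWOA
--     3: (5, 0, 4),      # DREI
--     4: (9, 6, 5),      # VIERE
--     5: (6, 7, 4),      # FÜMF (hour)
--     6: (9, 0, 6),      # SECHSE
--     7: (6, 0, 6),      # SIEBNE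
--     8: (8, 1, 4),      # OCHT
--     9: (5, 5, 5),      # NEINE
--     10: (8, 5, 5),     # ZEHNE
--     11: (7, 8, 3),     # ELF
--     12: (4, 5, 5),     # ZWÖFE
-- }
--
-- def qlocktwo_ooe_active_cells(hour: int, minute: int) -> list[list[int]]:
--     """OÖ dialect variant of :func:`qlocktwo_active_cells`.
--
--     Same five-minute rounding and hour-rollover-after-30 rules, but with
--     dialect vocabulary and without UHR. At the full hour the phrase reads
--     "ES IS <hour>" (e.g. 13:00 → "ES IS OANS").
--     """
--     block = (minute // 5) * 5
--     this_hour = _hour_12(hour)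
--     next_hour = _hour_12(hour + 1)
--
--     words: list[tuple[int, int, int]] = [_OOE_ES, _OOE_IS]
--     if block == 0:
--         words += [_OOE_HOUR_WORDS[this_hour]]
--     elif block == 5:
--         words += [_OOE_FUEMF_MIN, _OOE_NOCH, _OOE_HOUR_WORDS[this_hour]]
--     elif block == 10:
--         words += [_OOE_ZEHN_MIN, _OOE_NOCH, _OOE_HOUR_WORDS[this_hour]]
--     elif block == 15:
--         words += [_OOE_VIERTL, _OOE_NOCH, _OOE_HOUR_WORDS[this_hour]]
--     elif block == 20:
--         words += [_OOE_ZWANZG_MIN, _OOE_NOCH, _OOE_HOUR_WORDS[this_hour]]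
--     elif block == 25:
--         words += [_OOE_FUEMF_MIN, _OOE_VOR, _OOE_HOIBE, _OOE_HOUR_WORDS[next_hour]]
--     elif block == 30:
--         words += [_OOE_HOIBE, _OOE_HOUR_WORDS[next_hour]]
--     elif block == 35:
--         words += [_OOE_FUEMF_MIN, _OOE_NOCH, _OOE_HOIBE, _OOE_HOUR_WORDS[next_hour]]
--     elif block == 40:
--         words += [_OOE_ZWANZG_MIN, _OOE_VOR, _OOE_HOUR_WORDS[next_hour]]
--     elif block == 45:
--         words += [_OOE_VIERTL, _OOE_VOR, _OOE_HOUR_WORDS[next_hour]]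
--     elif block == 50:
--         words += [_OOE_ZEHN_MIN, _OOE_VOR, _OOE_HOUR_WORDS[next_hour]]
--     elif block == 55:
--         words += [_OOE_FUEMF_MIN, _OOE_VOR, _OOE_HOUR_WORDS[next_hour]]
--
--     cells: set[tuple[int, int]] = set()
--     for word in words:
--         cells.update(_expand(word))
--     return [[row, col] for row, col in sorted(cells)]
-- ===== SOURCE B (Python) =====
-- _OOE_ES = (0, 0, 2)
-- _OOE_IS = (0, 3, 2)
-- _OOE_FUEMF_MIN = (0, 7, 4)
-- _OOE_ZEHN_MIN = (1, 0, 4)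
-- _OOE_ZWANZG_MIN = (1, 5, 6)
-- _OOE_VIERTL = (2, 4, 6)
-- _OOE_NOCH = (3, 2, 4)
-- _OOE_VOR = (3, 7, 3)
-- _OOE_HOIBE = (4, 0, 5)
--
-- _OOE_HOUR_WORDS: dict[int, tuple[int, int, int]] = {
--     1: (7, 0, 4),
--     2: (7, 4, 4),
--     3: (5, 0, 4),
--     4: (9, 6, 5),
--     5: (6, 7, 4),
--     6: (9, 0, 6),
--     7: (6, 0, 6),
--     8: (8, 1, 4),
--     9: (5, 5, 5),
--     10: (8, 5, 5),
--     11: (7, 8, 3),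
--     12: (4, 5, 5),
-- }
--
-- # Minute-count words keyed by the number of minutes they name.
-- _OOE_MIN_WORDS = {5: _OOE_FUEMF_MIN, 10: _OOE_ZEHN_MIN, 15: _OOE_VIERTL, 20: _OOE_ZWANZG_MIN}
--
-- def _hour_12(hour_24: int) -> int:
--     h = hour_24 % 12
--     return 12 if h == 0 else h
--
-- def qlocktwo_ooe_active_cells(hour: int, minute: int) -> list[list[int]]:
--     """Paint each word into a per-row bitmask grid (duplicates OR away), classify the
--     five-minute block by arithmetic ranges instead of per-block cases, and emit the
--     cells by a row-major scan of the grid, which is already sorted order."""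
--     block = (minute // 5) * 5
--     rows = [0] * 10
--
--     def paint(word):
--         r, c, n = word
--         rows[r] |= ((1 << n) - 1) << c
--
--     paint(_OOE_ES)
--     paint(_OOE_IS)
--     if block == 0:
--         paint(_OOE_HOUR_WORDS[_hour_12(hour)])
--     elif 5 <= block <= 20:
--         paint(_OOE_MIN_WORDS[block])
--         paint(_OOE_NOCH)
--         paint(_OOE_HOUR_WORDS[_hour_12(hour)])
--     elif 25 <= block <= 35:
--         if block != 30:
--             paint(_OOE_FUEMF_MIN)
--             paint(_OOE_NOCH if block == 35 else _OOE_VOR)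
--         paint(_OOE_HOIBE)
--         paint(_OOE_HOUR_WORDS[_hour_12(hour + 1)])
--     elif 40 <= block <= 55:
--         paint(_OOE_MIN_WORDS[60 - block])
--         paint(_OOE_VOR)
--         paint(_OOE_HOUR_WORDS[_hour_12(hour + 1)])
--     return [[r, c] for r in range(10) for c in range(11) if (rows[r] >> c) & 1]
-- ===== Notes on version B (the rewrite author's own statement) =====
-- stated objective: alternative
-- what changed: Replaced the 12-way if/elif word-list dispatch plus set union plus sorted() with a per-row bitmask grid: words are painted by OR-ing bit ranges (duplicates vanish), the five-minute block is classified by four arithmetic ranges (<min> NOCH this-hour / around-half next-hour / <60-min> VOR next-hour) instead of per-block cases, and the cells are emitted by a row-major scan of the grid, which yields sorted order without sorting.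
import Mathlib
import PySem

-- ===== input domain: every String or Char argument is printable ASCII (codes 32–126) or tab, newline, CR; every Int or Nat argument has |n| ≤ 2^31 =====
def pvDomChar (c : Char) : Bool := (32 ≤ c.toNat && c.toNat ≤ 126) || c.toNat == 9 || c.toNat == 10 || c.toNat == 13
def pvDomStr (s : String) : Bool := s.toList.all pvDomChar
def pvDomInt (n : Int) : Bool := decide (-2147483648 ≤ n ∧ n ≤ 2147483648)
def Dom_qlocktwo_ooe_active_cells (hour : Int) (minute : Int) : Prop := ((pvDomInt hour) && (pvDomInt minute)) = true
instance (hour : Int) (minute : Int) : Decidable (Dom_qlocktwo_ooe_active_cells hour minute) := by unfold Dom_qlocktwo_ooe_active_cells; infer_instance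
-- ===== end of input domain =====

-- B replaces A's 12-way if/elif word-list dispatch + set union + sorted by a per-row
-- bitmask grid painted via an arithmetic 4-range block classification and emitted by a
-- row-major scan (no set, no sort); simpler decomposition, same values.


-- ===== PORT A =====
-- pv_expand / pv_hour_12 / pv_OOE_HOUR_WORDS port the module-level helpers _expand /
-- _hour_12 / _OOE_HOUR_WORDS shared verbatim by Source A and Source B.
def pv_expand (word : Int × Int × Int) : List (Int × Int) :=
  (PySem.List.pyRange 0 word.2.2 1).map (fun i => (word.1, word.2.1 + i))

def pv_hour_12 (hour_24 : Int) : Int :=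
  let h := PySem.Int.mod hour_24 12
  if h = 0 then 12 else h

def pvA_OOE_ES : Int × Int × Int := (0, 0, 2)
def pvA_OOE_IS : Int × Int × Int := (0, 3, 2)
def pvA_OOE_FUEMF_MIN : Int × Int × Int := (0, 7, 4)
def pvA_OOE_ZEHN_MIN : Int × Int × Int := (1, 0, 4)
def pvA_OOE_ZWANZG_MIN : Int × Int × Int := (1, 5, 6)
def pvA_OOE_VIERTL : Int × Int × Int := (2, 4, 6)
def pvA_OOE_NOCH : Int × Int × Int := (3, 2, 4)
def pvA_OOE_VOR : Int × Int × Int := (3, 7, 3)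
def pvA_OOE_HOIBE : Int × Int × Int := (4, 0, 5)

def pv_OOE_HOUR_WORDS : PySem.Dict Int (Int × Int × Int) :=
  PySem.Dict.mk [(1, (7, 0, 4)), (2, (7, 4, 4)), (3, (5, 0, 4)), (4, (9, 6, 5)),
   (5, (6, 7, 4)), (6, (9, 0, 6)), (7, (6, 0, 6)), (8, (8, 1, 4)),
   (9, (5, 5, 5)), (10, (8, 5, 5)), (11, (7, 8, 3)), (12, (4, 5, 5))]

def qlocktwo_ooe_active_cells (hour : Int) (minute : Int) : List (List Int) :=
  let block := PySem.Int.floordiv minute 5 * 5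
  let this_hour := pv_hour_12 hour
  let next_hour := pv_hour_12 (hour + 1)
  -- _OOE_HOUR_WORDS[k]: the key is always present (pv_hour_12 returns 1..12),
  -- so Python's KeyError is unreachable; getD's default is never used.
  let words : List (Int × Int × Int) :=
    if block = 0 then
      [pvA_OOE_ES, pvA_OOE_IS] ++ [pv_OOE_HOUR_WORDS.getD this_hour (0, 0, 0)]
    else if block = 5 then
      [pvA_OOE_ES, pvA_OOE_IS] ++ [pvA_OOE_FUEMF_MIN, pvA_OOE_NOCH, pv_OOE_HOUR_WORDS.getD this_hour (0, 0, 0)]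
    else if block = 10 then
      [pvA_OOE_ES, pvA_OOE_IS] ++ [pvA_OOE_ZEHN_MIN, pvA_OOE_NOCH, pv_OOE_HOUR_WORDS.getD this_hour (0, 0, 0)]
    else if block = 15 then
      [pvA_OOE_ES, pvA_OOE_IS] ++ [pvA_OOE_VIERTL, pvA_OOE_NOCH, pv_OOE_HOUR_WORDS.getD this_hour (0, 0, 0)]
    else if block = 20 then
      [pvA_OOE_ES, pvA_OOE_IS] ++ [pvA_OOE_ZWANZG_MIN, pvA_OOE_NOCH, pv_OOE_HOUR_WORDS.getD this_hour (0, 0, 0)]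
    else if block = 25 then
      [pvA_OOE_ES, pvA_OOE_IS] ++ [pvA_OOE_FUEMF_MIN, pvA_OOE_VOR, pvA_OOE_HOIBE, pv_OOE_HOUR_WORDS.getD next_hour (0, 0, 0)]
    else if block = 30 then
      [pvA_OOE_ES, pvA_OOE_IS] ++ [pvA_OOE_HOIBE, pv_OOE_HOUR_WORDS.getD next_hour (0, 0, 0)]
    else if block = 35 then
      [pvA_OOE_ES, pvA_OOE_IS] ++ [pvA_OOE_FUEMF_MIN, pvA_OOE_NOCH, pvA_OOE_HOIBE, pv_OOE_HOUR_WORDS.getD next_hour (0, 0, 0)]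
    else if block = 40 then
      [pvA_OOE_ES, pvA_OOE_IS] ++ [pvA_OOE_ZWANZG_MIN, pvA_OOE_VOR, pv_OOE_HOUR_WORDS.getD next_hour (0, 0, 0)]
    else if block = 45 then
      [pvA_OOE_ES, pvA_OOE_IS] ++ [pvA_OOE_VIERTL, pvA_OOE_VOR, pv_OOE_HOUR_WORDS.getD next_hour (0, 0, 0)]
    else if block = 50 then
      [pvA_OOE_ES, pvA_OOE_IS] ++ [pvA_OOE_ZEHN_MIN, pvA_OOE_VOR, pv_OOE_HOUR_WORDS.getD next_hour (0, 0, 0)]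
    else if block = 55 then
      [pvA_OOE_ES, pvA_OOE_IS] ++ [pvA_OOE_FUEMF_MIN, pvA_OOE_VOR, pv_OOE_HOUR_WORDS.getD next_hour (0, 0, 0)]
    else
      [pvA_OOE_ES, pvA_OOE_IS]
  let cells : PySem.Set (Int × Int) :=
    words.foldl (fun s w => PySem.Set.update s (pv_expand w)) PySem.Set.empty
  (PySem.List.sorted2 cells Prod.fst Prod.snd).map (fun p => [p.1, p.2])

-- ===== PORT B =====
def pvB_OOE_MIN_WORDS : PySem.Dict Int (Int × Int × Int) :=
  PySem.Dict.mk [(5, pvA_OOE_FUEMF_MIN), (10, pvA_OOE_ZEHN_MIN), (15, pvA_OOE_VIERTL), (20, pvA_OOE_ZWANZG_MIN)]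

-- rows[r] |= ((1 << n) - 1) << c: all the Python ints involved are nonnegative, so the
-- bit operations are ported exactly on Nat; the row/col/len components are the literal
-- nonnegative tuple entries, so .toNat is exact here (no negative index ever occurs).
def pv_paint (rows : List Nat) (word : Int × Int × Int) : List Nat :=
  rows.set word.1.toNat ((rows.getD word.1.toNat 0) ||| (((1 <<< word.2.2.toNat) - 1) <<< word.2.1.toNat))

def qlocktwo_ooe_active_cells_alt (hour : Int) (minute : Int) : List (List Int) :=
  let block := PySem.Int.floordiv minute 5 * 5
  let rows : List Nat := List.replicate 10 0
  let rows := pv_paint (pv_paint rows pvA_OOE_ES) pvA_OOE_IS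
  -- dict lookups _OOE_MIN_WORDS[...] / _OOE_HOUR_WORDS[...]: keys always present on the
  -- branches taken, so getD's default is never used (no KeyError reachable).
  let rows :=
    if block = 0 then
      pv_paint rows (pv_OOE_HOUR_WORDS.getD (pv_hour_12 hour) (0, 0, 0))
    else if 5 ≤ block ∧ block ≤ 20 then
      pv_paint (pv_paint (pv_paint rows (pvB_OOE_MIN_WORDS.getD block (0, 0, 0))) pvA_OOE_NOCH)
        (pv_OOE_HOUR_WORDS.getD (pv_hour_12 hour) (0, 0, 0))
    else if 25 ≤ block ∧ block ≤ 35 then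
      let rows := if block ≠ 30 then
          pv_paint (pv_paint rows pvA_OOE_FUEMF_MIN) (if block = 35 then pvA_OOE_NOCH else pvA_OOE_VOR)
        else rows
      pv_paint (pv_paint rows pvA_OOE_HOIBE) (pv_OOE_HOUR_WORDS.getD (pv_hour_12 (hour + 1)) (0, 0, 0))
    else if 40 ≤ block ∧ block ≤ 55 then
      pv_paint (pv_paint (pv_paint rows (pvB_OOE_MIN_WORDS.getD (60 - block) (0, 0, 0))) pvA_OOE_VOR)
        (pv_OOE_HOUR_WORDS.getD (pv_hour_12 (hour + 1)) (0, 0, 0))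
    else rows
  (List.range 10).flatMap (fun r =>
    (List.range 11).filterMap (fun c =>
      if (rows.getD r 0 >>> c) &&& 1 = 1 then some [(r : Int), (c : Int)] else none))

-- ===== PRECONDITION & SPEC =====
def Spec_qlocktwo_ooe_active_cells (hour : Int) (minute : Int) (out : List (List Int)) : Prop := out = qlocktwo_ooe_active_cells_alt hour minute
instance (hour : Int) (minute : Int) (out : List (List Int)) : Decidable (Spec_qlocktwo_ooe_active_cells hour minute out) := by unfold Spec_qlocktwo_ooe_active_cells; infer_instance

-- ===== CLAIM (what is proved, stated in full; the proofs are below) =====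
def Claim_equal_qlocktwo_ooe_active_cells : Prop := ∀ (hour : Int) (minute : Int), Dom_qlocktwo_ooe_active_cells hour minute → Spec_qlocktwo_ooe_active_cells hour minute (qlocktwo_ooe_active_cells hour minute)

-- ===== LEMMAS AND PROOFS =====
-- Both ports depend on hour only through pv_hour_12 hour and pv_hour_12 (hour + 1),
-- and this pair takes exactly the 12 values below (one per residue of hour mod 12).
theorem pv_hour_pair (hour : Int) :
    (pv_hour_12 hour, pv_hour_12 (hour + 1)) ∈
      [((12 : Int), (1 : Int)), (1, 2), (2, 3), (3, 4), (4, 5), (5, 6),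
       (6, 7), (7, 8), (8, 9), (9, 10), (10, 11), (11, 12)] := by
  have h0 : PySem.Int.mod hour 12 = hour % 12 := PySem.Int.mod_eq_emod_of_pos (by omega)
  have h1 : PySem.Int.mod (hour + 1) 12 = (hour + 1) % 12 := PySem.Int.mod_eq_emod_of_pos (by omega)
  unfold pv_hour_12
  rw [h0, h1]
  have hrel : (hour + 1) % 12 = if hour % 12 = 11 then 0 else hour % 12 + 1 := by
    split <;> omega
  rw [hrel]
  set k := hour % 12 with hk
  have hk0 : 0 ≤ k := Int.emod_nonneg _ (by omega)
  have hk1 : k < 12 := Int.emod_lt_of_pos _ (by omega)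
  clear_value k
  interval_cases k <;> simp

-- ===== VERDICT (by name: the statement is the Claim_ definition above) =====
theorem qlocktwo_ooe_active_cells_spec : Claim_equal_qlocktwo_ooe_active_cells := by
  intro hour minute _
  unfold Spec_qlocktwo_ooe_active_cells qlocktwo_ooe_active_cells qlocktwo_ooe_active_cells_alt
  have hpair := pv_hour_pair hour
  set t := pv_hour_12 hour with ht
  set n := pv_hour_12 (hour + 1) with hn
  set q := PySem.Int.floordiv minute 5 with hq
  clear_value t n q
  clear ht hn hq
  by_cases h0 : q * 5 = 0
  · simp only [h0] at *; fin_cases hpair <;> decide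
  by_cases h5 : q * 5 = 5
  · simp only [h5] at *; fin_cases hpair <;> decide
  by_cases h10 : q * 5 = 10
  · simp only [h10] at *; fin_cases hpair <;> decide
  by_cases h15 : q * 5 = 15
  · simp only [h15] at *; fin_cases hpair <;> decide
  by_cases h20 : q * 5 = 20
  · simp only [h20] at *; fin_cases hpair <;> decide
  by_cases h25 : q * 5 = 25
  · simp only [h25] at *; fin_cases hpair <;> decide
  by_cases h30 : q * 5 = 30
  · simp only [h30] at *; fin_cases hpair <;> decide
  by_cases h35 : q * 5 = 35
  · simp only [h35] at *; fin_cases hpair <;> decide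
  by_cases h40 : q * 5 = 40
  · simp only [h40] at *; fin_cases hpair <;> decide
  by_cases h45 : q * 5 = 45
  · simp only [h45] at *; fin_cases hpair <;> decide
  by_cases h50 : q * 5 = 50
  · simp only [h50] at *; fin_cases hpair <;> decide
  by_cases h55 : q * 5 = 55
  · simp only [h55] at *; fin_cases hpair <;> decide
  · -- block outside 0..55: A appends no word beyond ES IS, B paints none beyond ES IS
    have c1 : ¬ (5 ≤ q * 5 ∧ q * 5 ≤ 20) := by omega
    have c2 : ¬ (25 ≤ q * 5 ∧ q * 5 ≤ 35) := by omega
    have c3 : ¬ (40 ≤ q * 5 ∧ q * 5 ≤ 55) := by omega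
    simp only [if_neg h0, if_neg h5, if_neg h10, if_neg h15, if_neg h20, if_neg h25,
      if_neg h30, if_neg h35, if_neg h40, if_neg h45, if_neg h50, if_neg h55,
      if_neg c1, if_neg c2, if_neg c3]
    decide
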